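-- pv_equiv track=rewrite | github.com/Menendez6/security-Exs | hw4/dictionary.py | generate_new
-- ===== SOURCE A (Python) =====
-- def generate_new(word,set_words):
--     word_1 = word.title()
--     if word_1 not in set_words:
--         set_words.add(word_1)
--         set_words = generate_new(word_1,set_words)
--     if "i" in word:
--         word_2 = word.replace("i","1")
--         set_words.add(word_2)
--         set_words = generate_new(word_2,set_words)
--     if "e" in word:
--         word_2 = word.replace("e",'3')
--         set_words.add(word_2)
--         set_words = generate_new(word_2,set_words)
--     if 'o' in word:
--         word_2 = word.replace("o","0")
--         set_words.add(word_2)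
--         set_words = generate_new(word_2,set_words)
--     return set_words
-- ===== SOURCE B (Python) =====
-- def generate_new(word, set_words):
--     # Memoized DFS over the variant graph: each word is fully expanded at most
--     # once (tracked in `expanded`), instead of A's unbounded re-expansion.
--     expanded = set()
--
--     def expand(w):
--         if w in expanded:
--             return
--         t = w.title()
--         if t not in set_words:
--             set_words.add(t)
--             expand(t)
--         for c, d in (("i", "1"), ("e", "3"), ("o", "0")):
--             if c in w:
--                 w2 = w.replace(c, d)
--                 set_words.add(w2)
--                 expand(w2)
--         expanded.add(w)
--
--     expand(word)
--     return set_words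
-- ===== Notes on version B (the rewrite author's own statement) =====
-- stated objective: alternative
-- what changed: B replaces A's naive recursion, which unconditionally re-expands every substitution variant on each visit, by a memoized DFS with an explicit 'expanded' set so each variant's successors are generated at most once; the returned set (and its construction order) is identical.
import Mathlib
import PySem

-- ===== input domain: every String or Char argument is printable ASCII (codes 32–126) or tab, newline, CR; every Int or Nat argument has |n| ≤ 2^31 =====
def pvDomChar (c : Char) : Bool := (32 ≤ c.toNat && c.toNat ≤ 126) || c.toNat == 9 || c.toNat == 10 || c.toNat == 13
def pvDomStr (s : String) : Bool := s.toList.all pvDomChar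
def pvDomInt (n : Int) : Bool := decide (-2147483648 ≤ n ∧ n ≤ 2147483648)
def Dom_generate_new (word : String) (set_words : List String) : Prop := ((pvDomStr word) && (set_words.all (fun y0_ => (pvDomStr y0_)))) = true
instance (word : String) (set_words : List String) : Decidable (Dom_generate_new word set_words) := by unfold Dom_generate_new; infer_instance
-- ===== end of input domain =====

-- B replaces A's unbounded re-expansion of variants by a memoized DFS (each variant
-- expanded once, tracked in an `expanded` set); same returned set, including its
-- construction order.  A mutates its set argument in place and returns it (B performs
-- the same additions); the equivalence proved here is about the return value.


def titleGo : Bool → List Char → List Char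
  | _, [] => []
  | prev, c :: t =>
    (if PySem.Chars.isalpha c then
        (if prev then PySem.Chars.lowerChar c else PySem.Chars.upperChar c)
      else c) :: titleGo (PySem.Chars.isalpha c) t

def pyTitle (s : String) : String := String.ofList (titleGo false s.toList)
def subsList : List (String × String) := [("i", "1"), ("e", "3"), ("o", "0")]

-- ===== PORT A =====
-- transliteration of A; the fuel argument is only a totality guard (fuelA is proved
-- sufficient below: the fuel-0 case is never reached)

def genAF : Nat → String → List String → List String
  | 0, _, S => S
  | f + 1, word, S =>
    let word_1 := pyTitle word
    let s1 := if PySem.Set.contains S word_1 = false then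
        genAF f word_1 (PySem.Set.add S word_1)
      else S
    let s2 := if PySem.Str.isIn "i" word = true then
        genAF f (PySem.Str.replace word "i" "1") (PySem.Set.add s1 (PySem.Str.replace word "i" "1"))
      else s1
    let s3 := if PySem.Str.isIn "e" word = true then
        genAF f (PySem.Str.replace word "e" "3") (PySem.Set.add s2 (PySem.Str.replace word "e" "3"))
      else s2
    let s4 := if PySem.Str.isIn "o" word = true then
        genAF f (PySem.Str.replace word "o" "0") (PySem.Set.add s3 (PySem.Str.replace word "o" "0"))
      else s3
    s4

def fuelA (w : String) : Nat := 6 ^ w.toList.length * (w.toList.length + 1) + w.toList.length + 1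

def generate_new (word : String) (set_words : List String) : List String :=
  genAF (fuelA word) word set_words

-- ===== PORT B =====
-- transliteration of B: memoized DFS; `E` is the `expanded` set, a word is marked
-- after its expansion finishes, and an already-expanded word is never re-expanded
-- (same fuel guard, never reached either)

mutual
def genBF : Nat → String → List String → List String → List String × List String
  | 0, _, S, E => (S, E)
  | f + 1, w, S, E =>
    if PySem.Set.contains E w = true then (S, E)
    else
      let t := pyTitle w
      let p1 := if PySem.Set.contains S t = false then
          genBF f t (PySem.Set.add S t) E
        else (S, E)
      let p2 := genBLF f subsList w p1.1 p1.2
      (p2.1, PySem.Set.add p2.2 w)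
termination_by f => (f, 0)
decreasing_by
  · exact Prod.Lex.left _ _ (by omega)
  · exact Prod.Lex.left _ _ (by omega)

def genBLF : Nat → List (String × String) → String → List String → List String → List String × List String
  | _, [], _, S, E => (S, E)
  | f, (a, b) :: rest, w, S, E =>
    if PySem.Str.isIn a w = true then
      let r := genBF f (PySem.Str.replace w a b) (PySem.Set.add S (PySem.Str.replace w a b)) E
      genBLF f rest w r.1 r.2
    else genBLF f rest w S E
termination_by f pend => (f, pend.length + 1)
decreasing_by
  · exact Prod.Lex.right _ (by simp only [List.length_cons]; omega)
  · exact Prod.Lex.right _ (by simp only [List.length_cons]; omega)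
  · exact Prod.Lex.right _ (by simp only [List.length_cons]; omega)
end

def generate_new_alt (word : String) (set_words : List String) : List String :=
  (genBF (fuelA word) word set_words []).1

-- ===== PRECONDITION & SPEC =====
def Spec_generate_new (word : String) (set_words : List String) (out : List String) : Prop := out = generate_new_alt word set_words
instance (word : String) (set_words : List String) (out : List String) : Decidable (Spec_generate_new word set_words out) := by unfold Spec_generate_new; infer_instance

-- ===== CLAIM (what is proved, stated in full; the proofs are below) =====
def Claim_equal_generate_new : Prop := ∀ (word : String) (set_words : List String), Dom_generate_new word set_words → Spec_generate_new word set_words (generate_new word set_words)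

-- ===== LEMMAS AND PROOFS =====

def ieoN (w : String) : Nat :=
  w.toList.count 'i' + w.toList.count 'e' + w.toList.count 'o'

def optsC (c : Char) : Finset Char :=
  {c, PySem.Chars.lowerChar c, PySem.Chars.upperChar c, '1', '3', '0'}

def univL : List Char → Finset (List Char)
  | [] => {[]}
  | c :: cs => (optsC c).biUnion (fun d => (univL cs).image (d :: ·))

def gapU (w : String) (S : List String) : Nat :=
  ((univL w.toList).filter (fun l => ¬ (String.ofList l ∈ S))).card

def phiA (w : String) (S : List String) : Nat :=
  gapU w S * (w.toList.length + 1) + ieoN w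


-- ---------- char case facts ----------
theorem isupper_iff (c : Char) : PySem.Chars.isupper c = true ↔ 65 ≤ c.toNat ∧ c.toNat ≤ 90 := by
  unfold PySem.Chars.isupper
  rw [Bool.and_eq_true, decide_eq_true_eq, decide_eq_true_eq, Char.le_def, Char.le_def,
      UInt32.le_iff_toNat_le, UInt32.le_iff_toNat_le]
  exact Iff.rfl

theorem islower_iff (c : Char) : PySem.Chars.islower c = true ↔ 97 ≤ c.toNat ∧ c.toNat ≤ 122 := by
  unfold PySem.Chars.islower
  rw [Bool.and_eq_true, decide_eq_true_eq, decide_eq_true_eq, Char.le_def, Char.le_def,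
      UInt32.le_iff_toNat_le, UInt32.le_iff_toNat_le]
  exact Iff.rfl

theorem toNat_lower (c : Char) (h : 65 ≤ c.toNat ∧ c.toNat ≤ 90) :
    (PySem.Chars.lowerChar c).toNat = c.toNat + 32 := by
  rw [PySem.Chars.lowerChar, if_pos ((isupper_iff c).mpr h)]
  rw [Char.toNat_ofNat]
  simp [Nat.isValidChar]
  omega

theorem lower_eq_self (c : Char) (h : ¬ (65 ≤ c.toNat ∧ c.toNat ≤ 90)) :
    PySem.Chars.lowerChar c = c := by
  rw [PySem.Chars.lowerChar, if_neg]
  intro hc; exact h ((isupper_iff c).mp hc)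

theorem toNat_upper (c : Char) (h : 97 ≤ c.toNat ∧ c.toNat ≤ 122) :
    (PySem.Chars.upperChar c).toNat = c.toNat - 32 := by
  rw [PySem.Chars.upperChar, if_pos ((islower_iff c).mpr h)]
  rw [Char.toNat_ofNat]
  simp [Nat.isValidChar]
  omega

theorem upper_eq_self (c : Char) (h : ¬ (97 ≤ c.toNat ∧ c.toNat ≤ 122)) :
    PySem.Chars.upperChar c = c := by
  rw [PySem.Chars.upperChar, if_neg]
  intro hc; exact h ((islower_iff c).mp hc)

theorem char_eq_of_toNat {a b : Char} (h : a.toNat = b.toNat) : a = b :=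
  Char.ext (UInt32.toNat_inj.mp h)

theorem lower_lower (c : Char) : PySem.Chars.lowerChar (PySem.Chars.lowerChar c) = PySem.Chars.lowerChar c := by
  by_cases h : 65 ≤ c.toNat ∧ c.toNat ≤ 90
  · apply lower_eq_self; rw [toNat_lower c h]; omega
  · rw [lower_eq_self c h, lower_eq_self c h]

theorem upper_upper (c : Char) : PySem.Chars.upperChar (PySem.Chars.upperChar c) = PySem.Chars.upperChar c := by
  by_cases h : 97 ≤ c.toNat ∧ c.toNat ≤ 122
  · apply upper_eq_self; rw [toNat_upper c h]; omega
  · rw [upper_eq_self c h, upper_eq_self c h]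

theorem upper_lower (c : Char) :
    PySem.Chars.upperChar (PySem.Chars.lowerChar c) = c ∨
    PySem.Chars.upperChar (PySem.Chars.lowerChar c) = PySem.Chars.upperChar c := by
  by_cases h : 65 ≤ c.toNat ∧ c.toNat ≤ 90
  · left
    apply char_eq_of_toNat
    rw [toNat_upper _ (by rw [toNat_lower c h]; omega), toNat_lower c h]
    omega
  · right; rw [lower_eq_self c h]

theorem lower_upper (c : Char) :
    PySem.Chars.lowerChar (PySem.Chars.upperChar c) = c ∨
    PySem.Chars.lowerChar (PySem.Chars.upperChar c) = PySem.Chars.lowerChar c := by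
  by_cases h : 97 ≤ c.toNat ∧ c.toNat ≤ 122
  · left
    apply char_eq_of_toNat
    rw [toNat_lower _ (by rw [toNat_upper c h]; omega), toNat_upper c h]
    omega
  · right; rw [upper_eq_self c h]

theorem mem_optsC_self (c : Char) : c ∈ optsC c := by simp [optsC]
theorem mem_optsC_lower (c : Char) : PySem.Chars.lowerChar c ∈ optsC c := by simp [optsC]
theorem mem_optsC_upper (c : Char) : PySem.Chars.upperChar c ∈ optsC c := by simp [optsC]
theorem mem_optsC_digit (c b : Char) (hb : b = '1' ∨ b = '3' ∨ b = '0') : b ∈ optsC c := by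
  rcases hb with h | h | h <;> subst h <;> simp [optsC]

theorem optsC_digit_eq (b : Char) (hb : b = '1' ∨ b = '3' ∨ b = '0') :
    optsC b = {b, '1', '3', '0'} := by
  rcases hb with h | h | h <;> subst h <;> decide

theorem optsC_trans {c d : Char} (hd : d ∈ optsC c) : optsC d ⊆ optsC c := by
  have hdig : ∀ x ∈ ({('1' : Char), '3', '0'} : Finset Char), x ∈ optsC c := by
    intro x hx; simp at hx
    rcases hx with h | h | h <;> subst h <;> simp [optsC]
  simp only [optsC, Finset.mem_insert, Finset.mem_singleton] at hd
  rcases hd with rfl | rfl | rfl | rfl | rfl | rfl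
  · exact Finset.Subset.refl _
  · -- d = lowerChar c
    intro x hx
    simp only [optsC, Finset.mem_insert, Finset.mem_singleton] at hx
    rcases hx with rfl | rfl | rfl | rfl | rfl | rfl
    · exact mem_optsC_lower c
    · rw [lower_lower]; exact mem_optsC_lower c
    · rcases upper_lower c with h | h <;> rw [h]
      · exact mem_optsC_self c
      · exact mem_optsC_upper c
    all_goals exact mem_optsC_digit c _ (by simp)
  · -- d = upperChar c
    intro x hx
    simp only [optsC, Finset.mem_insert, Finset.mem_singleton] at hx
    rcases hx with rfl | rfl | rfl | rfl | rfl | rfl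
    · exact mem_optsC_upper c
    · rcases lower_upper c with h | h <;> rw [h]
      · exact mem_optsC_self c
      · exact mem_optsC_lower c
    · rw [upper_upper]; exact mem_optsC_upper c
    all_goals exact mem_optsC_digit c _ (by simp)
  all_goals
    rw [optsC_digit_eq _ (by simp)]
    intro x hx
    simp only [Finset.mem_insert, Finset.mem_singleton] at hx
    rcases hx with rfl | rfl | rfl | rfl <;> exact mem_optsC_digit c _ (by simp)

-- ---------- universe ----------
theorem mem_univL {x l : List Char} :
    x ∈ univL l ↔ List.Forall₂ (fun d c => d ∈ optsC c) x l := by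
  induction l generalizing x with
  | nil => simp [univL, List.forall₂_nil_right_iff]
  | cons c cs ih =>
    simp only [univL, Finset.mem_biUnion, Finset.mem_image, List.forall₂_cons_right_iff]
    constructor
    · rintro ⟨d, hd, y, hy, rfl⟩; exact ⟨d, y, hd, ih.mp hy, rfl⟩
    · rintro ⟨d, y, hd, hy, rfl⟩; exact ⟨d, hd, y, ih.mpr hy, rfl⟩

theorem forall2_optsC_trans {x m l : List Char}
    (h1 : List.Forall₂ (fun d c => d ∈ optsC c) x m)
    (h2 : List.Forall₂ (fun d c => d ∈ optsC c) m l) :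
    List.Forall₂ (fun d c => d ∈ optsC c) x l := by
  induction h2 generalizing x with
  | nil => cases h1; exact List.Forall₂.nil
  | cons hdc _ ih =>
    cases h1 with
    | cons hxd hxm => exact List.Forall₂.cons (optsC_trans hdc hxd) (ih hxm)

theorem univL_mono {m l : List Char}
    (h : List.Forall₂ (fun d c => d ∈ optsC c) m l) : univL m ⊆ univL l := by
  intro x hx
  exact mem_univL.mpr (forall2_optsC_trans (mem_univL.mp hx) h)


-- ---------- title ----------
theorem titleGo_opts (p : Bool) (l : List Char) :
    List.Forall₂ (fun d c => d ∈ optsC c) (titleGo p l) l := by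
  induction l generalizing p with
  | nil => exact List.Forall₂.nil
  | cons c t ih =>
    refine List.Forall₂.cons ?_ (ih _)
    by_cases ha : PySem.Chars.isalpha c = true
    · cases p <;> simp [ha, mem_optsC_lower, mem_optsC_upper]
    · simp [ha, mem_optsC_self]

theorem length_titleGo (p : Bool) (l : List Char) : (titleGo p l).length = l.length := by
  induction l generalizing p with
  | nil => rfl
  | cons c t ih => simp [titleGo, ih]

theorem toList_pyTitle (s : String) : (pyTitle s).toList = titleGo false s.toList := by
  simp [pyTitle]

-- ---------- single-char replace ----------
def subC (a b c : Char) : Char := if c = a then b else c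

theorem replace_go_single (a b : Char) :
    ∀ (fuel : Nat) (l acc : List Char), l.length ≤ fuel →
      PySem.Chars.replace.go [a] [b] fuel l acc = acc.reverse ++ l.map (subC a b) := by
  intro fuel
  induction fuel with
  | zero => intro l acc h; cases l with
    | nil => simp [PySem.Chars.replace.go]
    | cons c t => simp at h
  | succ f ih =>
    intro l acc h
    cases l with
    | nil => simp [PySem.Chars.replace.go]
    | cons c t =>
      rw [PySem.Chars.replace.go]
      by_cases hc : c = a
      · subst hc
        rw [if_pos (by simp [List.isPrefixOf])]
        rw [ih _ _ (by simpa using Nat.le_of_succ_le_succ h)]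
        simp [subC]
      · rw [if_neg (by simp [List.isPrefixOf]; exact fun h' => hc h'.symm)]
        rw [ih _ _ (by simpa using Nat.le_of_succ_le_succ h)]
        simp [subC, hc]

theorem replace_single (a b : Char) (l : List Char) :
    PySem.Chars.replace l [a] [b] = l.map (subC a b) := by
  rw [PySem.Chars.replace]
  rw [if_neg (by simp)]
  exact replace_go_single a b l.length l [] le_rfl

theorem subC_opts (a b c : Char) (hb : b = '1' ∨ b = '3' ∨ b = '0') :
    subC a b c ∈ optsC c := by
  unfold subC
  split
  · exact mem_optsC_digit c b hb
  · exact mem_optsC_self c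

theorem count_map_subC_self (a b : Char) (hba : b ≠ a) (l : List Char) :
    (l.map (subC a b)).count a = 0 := by
  rw [List.count_eq_zero]
  intro hmem
  rcases List.mem_map.mp hmem with ⟨c, _, hc⟩
  unfold subC at hc
  split at hc
  · exact hba hc
  · next hne => exact hne hc

theorem count_map_subC_other (a b x : Char) (hxa : x ≠ a) (hxb : x ≠ b) (l : List Char) :
    (l.map (subC a b)).count x = l.count x := by
  induction l with
  | nil => rfl
  | cons c t ih =>
    simp only [List.map_cons, List.count_cons, ih]
    congr 1
    unfold subC
    split
    · next hc => subst hc; simp [Ne.symm hxb, Ne.symm hxa]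
    · rfl

-- ---------- ieo ----------
theorem ieoL_le_length (l : List Char) : l.count 'i' + l.count 'e' + l.count 'o' ≤ l.length := by
  induction l with
  | nil => simp
  | cons c t ih =>
    simp only [List.count_cons, List.length_cons, beq_iff_eq]
    by_cases h1 : c = 'i' <;> by_cases h2 : c = 'e' <;> by_cases h3 : c = 'o' <;>
      simp only [h1, h2, h3, if_true, if_false] <;> simp_all <;> omega

theorem ieoN_le_length (w : String) : ieoN w ≤ w.toList.length := ieoL_le_length w.toList

-- ---------- membership helpers ----------
theorem mem_of_isIn_single (a : Char) (as : String) (w : String)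
    (ha : as.toList = [a]) (h : PySem.Str.isIn as w = true) : a ∈ w.toList := by
  rw [PySem.Str.isIn_eq, ha] at h
  exact List.singleton_sublist.mp (PySem.Chars.isIn_iff_infix _ _ |>.mp h).sublist

theorem forall2_map_subC (a b : Char) (hb : b = '1' ∨ b = '3' ∨ b = '0') (l : List Char) :
    List.Forall₂ (fun d c => d ∈ optsC c) (l.map (subC a b)) l := by
  induction l with
  | nil => exact List.Forall₂.nil
  | cons c t ih => exact List.Forall₂.cons (subC_opts a b c hb) ih

-- ---------- gap ----------
theorem gapU_le {w m : String} {S S' : List String}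
    (hu : univL m.toList ⊆ univL w.toList) (hs : ∀ x ∈ S, x ∈ S') :
    gapU m S' ≤ gapU w S := by
  apply Finset.card_le_card
  intro x hx
  simp only [Finset.mem_filter] at *
  exact ⟨hu hx.1, fun hm => hx.2 (hs _ hm)⟩

theorem gapU_lt_title {w : String} {S : List String}
    (h : pyTitle w ∉ S) :
    gapU (pyTitle w) (PySem.Set.add S (pyTitle w)) < gapU w S := by
  have hu : univL (pyTitle w).toList ⊆ univL w.toList := by
    rw [toList_pyTitle]; exact univL_mono (titleGo_opts false w.toList)
  have hmemu : (pyTitle w).toList ∈ univL w.toList := by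
    rw [toList_pyTitle]; exact mem_univL.mpr (titleGo_opts false w.toList)
  apply Finset.card_lt_card
  rw [Finset.ssubset_iff_of_subset]
  · refine ⟨(pyTitle w).toList, ?_, ?_⟩
    · simp only [Finset.mem_filter]
      exact ⟨hmemu, by rw [String.ofList_toList]; exact h⟩
    · simp only [Finset.mem_filter, not_and, not_not]
      intro _
      rw [String.ofList_toList]
      exact (PySem.Set.mem_add S (pyTitle w) (pyTitle w)).mpr (Or.inr rfl)
  · intro x hx
    simp only [Finset.mem_filter] at *
    exact ⟨hu hx.1, fun hm => hx.2 ((PySem.Set.mem_add S (pyTitle w) _).mpr (Or.inl hm))⟩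

-- ---------- the three decrease lemmas ----------
theorem dec_title (w : String) (S : List String)
    (h : PySem.Set.contains S (pyTitle w) = false) :
    phiA (pyTitle w) (PySem.Set.add S (pyTitle w)) < phiA w S := by
  have hnot : pyTitle w ∉ S := by
    simpa [PySem.Set.contains] using h
  have hg := gapU_lt_title hnot
  have hlen : (pyTitle w).toList.length = w.toList.length := by
    rw [toList_pyTitle]; exact length_titleGo false w.toList
  have hieo : ieoN (pyTitle w) ≤ w.toList.length := hlen ▸ ieoN_le_length (pyTitle w)
  unfold phiA
  rw [hlen]
  nlinarith [hieo, hg]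

theorem dec_sub (w : String) (S S' : List String) (a b : String)
    (hab : (a, b) ∈ subsList)
    (h2 : PySem.Str.isIn a w = true)
    (hS : ∀ x ∈ S, x ∈ S') :
    phiA (PySem.Str.replace w a b) (PySem.Set.add S' (PySem.Str.replace w a b)) < phiA w S := by
  have hab' : (a = "i" ∧ b = "1") ∨ (a = "e" ∧ b = "3") ∨ (a = "o" ∧ b = "0") := by
    simpa [subsList, Prod.ext_iff] using hab
  obtain ⟨ac, bc, hat, hbt, hbd, hmemc, hcnt⟩ :
      ∃ ac bc : Char, a.toList = [ac] ∧ b.toList = [bc] ∧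
        (bc = '1' ∨ bc = '3' ∨ bc = '0') ∧ ac ∈ w.toList ∧
        ieoN (PySem.Str.replace w a b) < ieoN w := by
    rcases hab' with ⟨rfl, rfl⟩ | ⟨rfl, rfl⟩ | ⟨rfl, rfl⟩
    · refine ⟨'i', '1', rfl, rfl, by simp, mem_of_isIn_single 'i' "i" w rfl h2, ?_⟩
      have htl : (PySem.Str.replace w "i" "1").toList = w.toList.map (subC 'i' '1') := by
        rw [PySem.Str.toList_replace]
        exact replace_single 'i' '1' w.toList
      unfold ieoN
      rw [htl, count_map_subC_self 'i' '1' (by decide) w.toList,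
          count_map_subC_other 'i' '1' 'e' (by decide) (by decide) w.toList,
          count_map_subC_other 'i' '1' 'o' (by decide) (by decide) w.toList]
      have := List.count_pos_iff.mpr (mem_of_isIn_single 'i' "i" w rfl h2)
      omega
    · refine ⟨'e', '3', rfl, rfl, by simp, mem_of_isIn_single 'e' "e" w rfl h2, ?_⟩
      have htl : (PySem.Str.replace w "e" "3").toList = w.toList.map (subC 'e' '3') := by
        rw [PySem.Str.toList_replace]
        exact replace_single 'e' '3' w.toList
      unfold ieoN
      rw [htl, count_map_subC_self 'e' '3' (by decide) w.toList,
          count_map_subC_other 'e' '3' 'i' (by decide) (by decide) w.toList,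
          count_map_subC_other 'e' '3' 'o' (by decide) (by decide) w.toList]
      have := List.count_pos_iff.mpr (mem_of_isIn_single 'e' "e" w rfl h2)
      omega
    · refine ⟨'o', '0', rfl, rfl, by simp, mem_of_isIn_single 'o' "o" w rfl h2, ?_⟩
      have htl : (PySem.Str.replace w "o" "0").toList = w.toList.map (subC 'o' '0') := by
        rw [PySem.Str.toList_replace]
        exact replace_single 'o' '0' w.toList
      unfold ieoN
      rw [htl, count_map_subC_self 'o' '0' (by decide) w.toList,
          count_map_subC_other 'o' '0' 'i' (by decide) (by decide) w.toList,
          count_map_subC_other 'o' '0' 'e' (by decide) (by decide) w.toList]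
      have := List.count_pos_iff.mpr (mem_of_isIn_single 'o' "o" w rfl h2)
      omega
  have htl : (PySem.Str.replace w a b).toList = w.toList.map (subC ac bc) := by
    rw [PySem.Str.toList_replace, hat, hbt, replace_single]
  have hu : univL (PySem.Str.replace w a b).toList ⊆ univL w.toList := by
    rw [htl]; exact univL_mono (forall2_map_subC ac bc hbd w.toList)
  have hg : gapU (PySem.Str.replace w a b) (PySem.Set.add S' (PySem.Str.replace w a b)) ≤ gapU w S :=
    gapU_le hu (fun x hx => (PySem.Set.mem_add _ _ _).mpr (Or.inl (hS x hx)))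
  have hlen : (PySem.Str.replace w a b).toList.length = w.toList.length := by
    rw [htl, List.length_map]
  unfold phiA
  rw [hlen]
  nlinarith [hg, hcnt]



theorem mem_add_self (S : List String) (x : String) : x ∈ PySem.Set.add S x :=
  (PySem.Set.mem_add S x x).mpr (Or.inr rfl)

theorem mem_add_of_mem {S : List String} {y : String} (x : String) (h : y ∈ S) :
    y ∈ PySem.Set.add S x :=
  (PySem.Set.mem_add S x y).mpr (Or.inl h)

theorem add_of_mem {x : String} {S : List String} (h : x ∈ S) : PySem.Set.add S x = S := by
  unfold PySem.Set.add
  rw [if_pos]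
  simp [PySem.Set.contains, h]

-- ---------- growth ----------
theorem growA : ∀ (f : Nat) (w : String) (S : List String), ∀ x ∈ S, x ∈ genAF f w S := by
  intro f
  induction f with
  | zero => intro w S x hx; simpa [genAF] using hx
  | succ f ih =>
    intro w S x hx
    simp only [genAF]
    have h1 : ∀ y ∈ S, y ∈ (if PySem.Set.contains S (pyTitle w) = false then
        genAF f (pyTitle w) (PySem.Set.add S (pyTitle w)) else S) := by
      intro y hy; split
      · exact ih _ _ _ (mem_add_of_mem _ hy)
      · exact hy
    have h2 : ∀ T : List String, (∀ y ∈ S, y ∈ T) → ∀ (a b : String),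
        ∀ y ∈ S, y ∈ (if PySem.Str.isIn a w = true then
          genAF f (PySem.Str.replace w a b) (PySem.Set.add T (PySem.Str.replace w a b)) else T) := by
      intro T hT a b y hy; split
      · exact ih _ _ _ (mem_add_of_mem _ (hT y hy))
      · exact hT y hy
    exact h2 _ (fun y hy => h2 _ (fun y hy => h2 _ h1 "i" "1" y hy) "e" "3" y hy) "o" "0" x hx

-- ---------- fuel adequacy ----------
theorem card_optsC_le (c : Char) : (optsC c).card ≤ 6 := by
  unfold optsC
  refine le_trans (Finset.card_insert_le _ _) ?_
  refine Nat.succ_le_succ ?_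
  refine le_trans (Finset.card_insert_le _ _) ?_
  refine Nat.succ_le_succ ?_
  refine le_trans (Finset.card_insert_le _ _) ?_
  refine Nat.succ_le_succ ?_
  refine le_trans (Finset.card_insert_le _ _) ?_
  refine Nat.succ_le_succ ?_
  refine le_trans (Finset.card_insert_le _ _) ?_
  simp

theorem card_univL_le (l : List Char) : (univL l).card ≤ 6 ^ l.length := by
  induction l with
  | nil => simp [univL]
  | cons c cs ih =>
    simp only [univL, List.length_cons]
    refine le_trans (Finset.card_biUnion_le) ?_
    refine le_trans (Finset.sum_le_card_nsmul _ _ (6 ^ cs.length) ?_) ?_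
    · intro d _
      exact le_trans (Finset.card_image_le) ih
    · simp only [smul_eq_mul, pow_succ]
      calc (optsC c).card * 6 ^ cs.length ≤ 6 * 6 ^ cs.length :=
            Nat.mul_le_mul_right _ (card_optsC_le c)
        _ = 6 ^ cs.length * 6 := by ring

theorem phi_lt_fuelA (w : String) (S : List String) : phiA w S < fuelA w := by
  unfold phiA fuelA
  have h1 : gapU w S ≤ 6 ^ w.toList.length := by
    refine le_trans ?_ (card_univL_le w.toList)
    exact Finset.card_le_card (Finset.filter_subset _ _)
  have h2 := ieoN_le_length w
  nlinarith [h1, h2]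

-- ---------- ieo decrease (standalone) ----------
theorem ieo_dec (w : String) (a b : String) (hab : (a, b) ∈ subsList)
    (h2 : PySem.Str.isIn a w = true) :
    ieoN (PySem.Str.replace w a b) < ieoN w := by
  have hab' : (a = "i" ∧ b = "1") ∨ (a = "e" ∧ b = "3") ∨ (a = "o" ∧ b = "0") := by
    simpa [subsList, Prod.ext_iff] using hab
  rcases hab' with ⟨rfl, rfl⟩ | ⟨rfl, rfl⟩ | ⟨rfl, rfl⟩
  · have htl : (PySem.Str.replace w "i" "1").toList = w.toList.map (subC 'i' '1') := by
      rw [PySem.Str.toList_replace]; exact replace_single 'i' '1' w.toList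
    unfold ieoN
    rw [htl, count_map_subC_self 'i' '1' (by decide) w.toList,
        count_map_subC_other 'i' '1' 'e' (by decide) (by decide) w.toList,
        count_map_subC_other 'i' '1' 'o' (by decide) (by decide) w.toList]
    have := List.count_pos_iff.mpr (mem_of_isIn_single 'i' "i" w rfl h2)
    omega
  · have htl : (PySem.Str.replace w "e" "3").toList = w.toList.map (subC 'e' '3') := by
      rw [PySem.Str.toList_replace]; exact replace_single 'e' '3' w.toList
    unfold ieoN
    rw [htl, count_map_subC_self 'e' '3' (by decide) w.toList,
        count_map_subC_other 'e' '3' 'i' (by decide) (by decide) w.toList,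
        count_map_subC_other 'e' '3' 'o' (by decide) (by decide) w.toList]
    have := List.count_pos_iff.mpr (mem_of_isIn_single 'e' "e" w rfl h2)
    omega
  · have htl : (PySem.Str.replace w "o" "0").toList = w.toList.map (subC 'o' '0') := by
      rw [PySem.Str.toList_replace]; exact replace_single 'o' '0' w.toList
    unfold ieoN
    rw [htl, count_map_subC_self 'o' '0' (by decide) w.toList,
        count_map_subC_other 'o' '0' 'i' (by decide) (by decide) w.toList,
        count_map_subC_other 'o' '0' 'e' (by decide) (by decide) w.toList]
    have := List.count_pos_iff.mpr (mem_of_isIn_single 'o' "o" w rfl h2)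
    omega

-- ---------- fuel independence of genAF ----------
theorem indepA : ∀ (n : Nat) (w : String) (S : List String) (f g : Nat),
    phiA w S ≤ n → phiA w S < f → phiA w S < g → genAF f w S = genAF g w S := by
  intro n
  induction n using Nat.strong_induction_on with
  | _ n IHn =>
  intro w S f g hn hf hg
  match f, g with
  | f + 1, g + 1 =>
    simp only [genAF]
    -- step 1: title branch
    have hX1 : (if PySem.Set.contains S (pyTitle w) = false then
          genAF f (pyTitle w) (PySem.Set.add S (pyTitle w)) else S) =
        (if PySem.Set.contains S (pyTitle w) = false then
          genAF g (pyTitle w) (PySem.Set.add S (pyTitle w)) else S) := by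
      by_cases hc : PySem.Set.contains S (pyTitle w) = false
      · rw [if_pos hc, if_pos hc]
        have hd := dec_title w S hc
        exact IHn (phiA (pyTitle w) (PySem.Set.add S (pyTitle w))) (by omega) _ _ _ _
          le_rfl (by omega) (by omega)
      · rw [if_neg hc, if_neg hc]
    rw [hX1]
    have hG1 : ∀ x ∈ S, x ∈ (if PySem.Set.contains S (pyTitle w) = false then
        genAF g (pyTitle w) (PySem.Set.add S (pyTitle w)) else S) := by
      intro x hx; split
      · exact growA _ _ _ _ (mem_add_of_mem _ hx)
      · exact hx
    -- generic substitution step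
    have step : ∀ (T : List String), (∀ x ∈ S, x ∈ T) → ∀ (a b : String), (a, b) ∈ subsList →
        ((if PySem.Str.isIn a w = true then
            genAF f (PySem.Str.replace w a b) (PySem.Set.add T (PySem.Str.replace w a b)) else T) =
         (if PySem.Str.isIn a w = true then
            genAF g (PySem.Str.replace w a b) (PySem.Set.add T (PySem.Str.replace w a b)) else T)) ∧
        (∀ x ∈ S, x ∈ (if PySem.Str.isIn a w = true then
            genAF g (PySem.Str.replace w a b) (PySem.Set.add T (PySem.Str.replace w a b)) else T)) := by
      intro T hT a b hab
      constructor
      · by_cases hc : PySem.Str.isIn a w = true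
        · rw [if_pos hc, if_pos hc]
          have hd := dec_sub w S T a b hab hc hT
          exact IHn (phiA (PySem.Str.replace w a b)
              (PySem.Set.add T (PySem.Str.replace w a b))) (by omega) _ _ _ _
            le_rfl (by omega) (by omega)
        · rw [if_neg hc, if_neg hc]
      · intro x hx; split
        · exact growA _ _ _ _ (mem_add_of_mem _ (hT x hx))
        · exact hT x hx
    obtain ⟨e2, m2⟩ := step _ hG1 "i" "1" (by simp [subsList])
    rw [e2]
    obtain ⟨e3, m3⟩ := step _ m2 "e" "3" (by simp [subsList])
    rw [e3]
    obtain ⟨e4, _⟩ := step _ m3 "o" "0" (by simp [subsList])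
    rw [e4]

-- ---------- the closure predicate ----------
def CProp (S : List String) (w : String) : Prop :=
  pyTitle w ∈ S ∧
  (PySem.Str.isIn "i" w = true →
    PySem.Str.replace w "i" "1" ∈ S ∧ CProp S (PySem.Str.replace w "i" "1")) ∧
  (PySem.Str.isIn "e" w = true →
    PySem.Str.replace w "e" "3" ∈ S ∧ CProp S (PySem.Str.replace w "e" "3")) ∧
  (PySem.Str.isIn "o" w = true →
    PySem.Str.replace w "o" "0" ∈ S ∧ CProp S (PySem.Str.replace w "o" "0"))
termination_by ieoN w
decreasing_by
  · exact ieo_dec w "i" "1" (by simp [subsList]) (by assumption)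
  · exact ieo_dec w "e" "3" (by simp [subsList]) (by assumption)
  · exact ieo_dec w "o" "0" (by simp [subsList]) (by assumption)

theorem CProp_mono : ∀ (n : Nat) (w : String), ieoN w ≤ n →
    ∀ (S S' : List String), (∀ x ∈ S, x ∈ S') → CProp S w → CProp S' w := by
  intro n
  induction n using Nat.strong_induction_on with
  | _ n IHn =>
  intro w hn S S' hss h
  rw [CProp] at h ⊢
  obtain ⟨ht, hi, he, ho⟩ := h
  refine ⟨hss _ ht, ?_, ?_, ?_⟩
  · intro hc
    obtain ⟨hm, hC⟩ := hi hc
    have := ieo_dec w "i" "1" (by simp [subsList]) hc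
    exact ⟨hss _ hm, IHn (ieoN (PySem.Str.replace w "i" "1")) (by omega) _ le_rfl _ _ hss hC⟩
  · intro hc
    obtain ⟨hm, hC⟩ := he hc
    have := ieo_dec w "e" "3" (by simp [subsList]) hc
    exact ⟨hss _ hm, IHn (ieoN (PySem.Str.replace w "e" "3")) (by omega) _ le_rfl _ _ hss hC⟩
  · intro hc
    obtain ⟨hm, hC⟩ := ho hc
    have := ieo_dec w "o" "0" (by simp [subsList]) hc
    exact ⟨hss _ hm, IHn (ieoN (PySem.Str.replace w "o" "0")) (by omega) _ le_rfl _ _ hss hC⟩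

-- ---------- re-expansion of a closed word is a no-op ----------
theorem noopA : ∀ (f : Nat) (w : String) (S : List String), CProp S w → genAF f w S = S := by
  intro f
  induction f with
  | zero => intro w S _; rfl
  | succ f ih =>
    intro w S h
    rw [CProp] at h
    obtain ⟨ht, hi, he, ho⟩ := h
    simp only [genAF]
    have hc1 : ¬ (PySem.Set.contains S (pyTitle w) = false) := by
      simp [PySem.Set.contains, ht]
    rw [if_neg hc1]
    have hstep : ∀ (a b : String),
        (PySem.Str.isIn a w = true →
          PySem.Str.replace w a b ∈ S ∧ CProp S (PySem.Str.replace w a b)) →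
        (if PySem.Str.isIn a w = true then
          genAF f (PySem.Str.replace w a b) (PySem.Set.add S (PySem.Str.replace w a b)) else S) = S := by
      intro a b hf
      by_cases hc : PySem.Str.isIn a w = true
      · obtain ⟨hm, hC⟩ := hf hc
        rw [if_pos hc, add_of_mem hm, ih _ _ hC]
      · rw [if_neg hc]
    rw [hstep "i" "1" hi, hstep "e" "3" he, hstep "o" "0" ho]

-- ---------- A-side unfolding ----------
def stepsA (w : String) : List (String × String) → List String → List String
  | [], S => S
  | (a, b) :: rest, S =>
    stepsA w rest
      (if PySem.Str.isIn a w = true then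
        generate_new (PySem.Str.replace w a b)
          (PySem.Set.add S (PySem.Str.replace w a b))
      else S)

theorem A_unfold (w : String) (S : List String) :
    generate_new w S = stepsA w subsList
      (if PySem.Set.contains S (pyTitle w) = false then
        generate_new (pyTitle w) (PySem.Set.add S (pyTitle w))
      else S) := by
  conv_lhs => rw [generate_new, show fuelA w =
    (6 ^ w.toList.length * (w.toList.length + 1) + w.toList.length) + 1 from rfl, genAF]
  have hphi := phi_lt_fuelA w S
  have hF : phiA w S < (6 ^ w.toList.length * (w.toList.length + 1) + w.toList.length) + 1 := by
    unfold fuelA at hphi; omega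
  set F0 := 6 ^ w.toList.length * (w.toList.length + 1) + w.toList.length with hF0
  -- title step
  have hX1 : (if PySem.Set.contains S (pyTitle w) = false then
        genAF F0 (pyTitle w) (PySem.Set.add S (pyTitle w)) else S) =
      (if PySem.Set.contains S (pyTitle w) = false then
        generate_new (pyTitle w) (PySem.Set.add S (pyTitle w)) else S) := by
    by_cases hc : PySem.Set.contains S (pyTitle w) = false
    · rw [if_pos hc, if_pos hc, generate_new]
      have hd := dec_title w S hc
      exact indepA (phiA (pyTitle w) (PySem.Set.add S (pyTitle w))) _ _ _ _
        le_rfl (by omega) (phi_lt_fuelA _ _)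
    · rw [if_neg hc, if_neg hc]
  rw [hX1]
  have hG1 : ∀ x ∈ S, x ∈ (if PySem.Set.contains S (pyTitle w) = false then
      generate_new (pyTitle w) (PySem.Set.add S (pyTitle w)) else S) := by
    intro x hx; split
    · exact growA _ _ _ _ (mem_add_of_mem _ hx)
    · exact hx
  have step : ∀ (T : List String), (∀ x ∈ S, x ∈ T) → ∀ (a b : String), (a, b) ∈ subsList →
      ((if PySem.Str.isIn a w = true then
          genAF F0 (PySem.Str.replace w a b) (PySem.Set.add T (PySem.Str.replace w a b)) else T) =
       (if PySem.Str.isIn a w = true then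
          generate_new (PySem.Str.replace w a b) (PySem.Set.add T (PySem.Str.replace w a b)) else T)) ∧
      (∀ x ∈ S, x ∈ (if PySem.Str.isIn a w = true then
          generate_new (PySem.Str.replace w a b) (PySem.Set.add T (PySem.Str.replace w a b)) else T)) := by
    intro T hT a b hab
    constructor
    · by_cases hc : PySem.Str.isIn a w = true
      · rw [if_pos hc, if_pos hc, generate_new]
        have hd := dec_sub w S T a b hab hc hT
        exact indepA (phiA (PySem.Str.replace w a b)
            (PySem.Set.add T (PySem.Str.replace w a b))) _ _ _ _
          le_rfl (by omega) (phi_lt_fuelA _ _)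
      · rw [if_neg hc, if_neg hc]
    · intro x hx; split
      · exact growA _ _ _ _ (mem_add_of_mem _ (hT x hx))
      · exact hT x hx
  obtain ⟨e2, m2⟩ := step _ hG1 "i" "1" (by simp [subsList])
  rw [e2]
  obtain ⟨e3, m3⟩ := step _ m2 "e" "3" (by simp [subsList])
  rw [e3]
  obtain ⟨e4, _⟩ := step _ m3 "o" "0" (by simp [subsList])
  rw [e4]
  simp only [stepsA, subsList]

-- ---------- loop simulation ----------
theorem loopSim
    (n : Nat)
    (IH : ∀ m, m < n → ∀ (w' : String) (S' E' : List String) (f' : Nat),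
        phiA w' S' ≤ m → phiA w' S' < f' → (∀ u ∈ E', CProp S' u) →
        (genBF f' w' S' E').1 = generate_new w' S' ∧
        (∀ u ∈ (genBF f' w' S' E').2, CProp (generate_new w' S') u) ∧
        (w' ∈ (genBF f' w' S' E').2))
    (w : String) (S0 : List String) (f : Nat)
    (hn : phiA w S0 ≤ n) (hfu : phiA w S0 ≤ f) :
    ∀ (pend : List (String × String)), (∀ q ∈ pend, q ∈ subsList) →
    ∀ (S E : List String), (∀ x ∈ S0, x ∈ S) → (∀ u ∈ E, CProp S u) →
      (genBLF f pend w S E).1 = stepsA w pend S ∧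
      (∀ x ∈ S, x ∈ stepsA w pend S) ∧
      (∀ u ∈ (genBLF f pend w S E).2, CProp (stepsA w pend S) u) ∧
      (∀ q ∈ pend, PySem.Str.isIn q.1 w = true →
        PySem.Str.replace w q.1 q.2 ∈ stepsA w pend S ∧
        CProp (stepsA w pend S) (PySem.Str.replace w q.1 q.2)) := by
  intro pend
  induction pend with
  | nil =>
    intro _ S E hgrow hIC
    simp only [genBLF, stepsA]
    exact ⟨trivial, fun x hx => hx, fun u hu => hIC u hu, by simp⟩
  | cons q rest ihp =>
    obtain ⟨a, b⟩ := q
    intro hp S E hgrow hIC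
    by_cases hc : PySem.Str.isIn a w = true
    · have hab : (a, b) ∈ subsList := hp _ (List.mem_cons_self)
      have hphi2 := dec_sub w S0 S a b hab hc hgrow
      have hICa : ∀ u ∈ E, CProp (PySem.Set.add S (PySem.Str.replace w a b)) u :=
        fun u hu => CProp_mono (ieoN u) u le_rfl _ _
          (fun x hx => mem_add_of_mem _ hx) (hIC u hu)
      obtain ⟨hBeq, hBC, hBself⟩ :=
        IH (phiA (PySem.Str.replace w a b) (PySem.Set.add S (PySem.Str.replace w a b)))
          (by omega) _ _ E f le_rfl (by omega) hICa
      -- unfold both sides one step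
      have hBL : genBLF f ((a, b) :: rest) w S E =
          genBLF f rest w
            (genBF f (PySem.Str.replace w a b)
              (PySem.Set.add S (PySem.Str.replace w a b)) E).1
            (genBF f (PySem.Str.replace w a b)
              (PySem.Set.add S (PySem.Str.replace w a b)) E).2 := by
        simp only [genBLF, if_pos hc]
      have hSA : stepsA w ((a, b) :: rest) S =
          stepsA w rest (generate_new (PySem.Str.replace w a b)
            (PySem.Set.add S (PySem.Str.replace w a b))) := by
        simp only [stepsA, if_pos hc]
      -- recurse on the rest
      have hgrow' : ∀ x ∈ S0, x ∈ (genBF f (PySem.Str.replace w a b)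
          (PySem.Set.add S (PySem.Str.replace w a b)) E).1 := by
        intro x hx
        rw [hBeq, generate_new]
        exact growA _ _ _ _ (mem_add_of_mem _ (hgrow x hx))
      have hIC' : ∀ u ∈ (genBF f (PySem.Str.replace w a b)
          (PySem.Set.add S (PySem.Str.replace w a b)) E).2,
          CProp (genBF f (PySem.Str.replace w a b)
            (PySem.Set.add S (PySem.Str.replace w a b)) E).1 u := by
        intro u hu
        rw [hBeq]
        exact hBC u hu
      obtain ⟨l1, l2, l3, l4⟩ := ihp (fun q hq => hp q (List.mem_cons_of_mem _ hq)) _ _ hgrow' hIC'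
      rw [hBL, hSA, hBeq]
      rw [hBeq] at l1 l2 l3 l4
      have hmemS : ∀ x ∈ S, x ∈ generate_new (PySem.Str.replace w a b)
          (PySem.Set.add S (PySem.Str.replace w a b)) := by
        intro x hx
        rw [generate_new]
        exact growA _ _ _ _ (mem_add_of_mem _ hx)
      refine ⟨l1, fun x hx => l2 _ (hmemS x hx), l3, ?_⟩
      intro q hq hcq
      rcases List.mem_cons.mp hq with rfl | hq'
      · -- the head pair
        refine ⟨l2 _ (by rw [generate_new]; exact growA _ _ _ _ (mem_add_self _ _)), ?_⟩
        exact CProp_mono (ieoN (PySem.Str.replace w a b)) _ le_rfl _ _ l2 (hBC _ hBself)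
      · exact l4 q hq' hcq
    · have hBL : genBLF f ((a, b) :: rest) w S E = genBLF f rest w S E := by
        simp only [genBLF, if_neg hc]
      have hSA : stepsA w ((a, b) :: rest) S = stepsA w rest S := by
        simp only [stepsA, if_neg hc]
      obtain ⟨l1, l2, l3, l4⟩ := ihp (fun q hq => hp q (List.mem_cons_of_mem _ hq)) S E hgrow hIC
      rw [hBL, hSA]
      refine ⟨l1, l2, l3, ?_⟩
      intro q hq hcq
      rcases List.mem_cons.mp hq with rfl | hq'
      · exact absurd hcq hc
      · exact l4 q hq' hcq

-- ---------- main simulation ----------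
theorem simB : ∀ (n : Nat) (w : String) (S E : List String) (f : Nat),
    phiA w S ≤ n → phiA w S < f → (∀ u ∈ E, CProp S u) →
    (genBF f w S E).1 = generate_new w S ∧
    (∀ u ∈ (genBF f w S E).2, CProp (generate_new w S) u) ∧
    (w ∈ (genBF f w S E).2) := by
  intro n
  induction n using Nat.strong_induction_on with
  | _ n IHn =>
  intro w S E f hn hf hIC
  match f with
  | f + 1 =>
  simp only [genBF]
  by_cases hmem : PySem.Set.contains E w = true
  · rw [if_pos hmem]
    have hw : w ∈ E := by simpa [PySem.Set.contains] using hmem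
    have hS : generate_new w S = S := by
      rw [generate_new]; exact noopA _ _ _ (hIC w hw)
    rw [hS]
    exact ⟨rfl, fun u hu => hIC u hu, hw⟩
  · rw [if_neg hmem]
    by_cases hc1 : PySem.Set.contains S (pyTitle w) = false
    · -- title branch taken
      rw [if_pos hc1]
      have hd := dec_title w S hc1
      obtain ⟨hB1, hC1, hself1⟩ :=
        IHn (phiA (pyTitle w) (PySem.Set.add S (pyTitle w))) (by omega)
          (pyTitle w) _ E f le_rfl (by omega)
          (fun u hu => CProp_mono (ieoN u) u le_rfl _ _
            (fun x hx => mem_add_of_mem _ hx) (hIC u hu))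
      obtain ⟨l1, l2, l3, l4⟩ :=
        loopSim n (fun m hm => IHn m hm) w S f (by omega) (by omega) subsList
          (fun q hq => hq)
          (genBF f (pyTitle w) (PySem.Set.add S (pyTitle w)) E).1
          (genBF f (pyTitle w) (PySem.Set.add S (pyTitle w)) E).2
          (by
            intro x hx
            rw [hB1, generate_new]
            exact growA _ _ _ _ (mem_add_of_mem _ hx))
          (fun u hu => by rw [hB1]; exact hC1 u hu)
      rw [hB1] at l1 l2 l3 l4
      have hAu : generate_new w S = stepsA w subsList
          (generate_new (pyTitle w) (PySem.Set.add S (pyTitle w))) := by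
        rw [A_unfold w S, if_pos hc1]
      rw [hB1]
      refine ⟨by rw [l1, hAu], ?_, mem_add_self _ _⟩
      intro u hu
      rcases (PySem.Set.mem_add _ _ _).mp hu with hu' | rfl
      · rw [hAu]; exact l3 u hu'
      · -- CProp for w itself
        rw [CProp, hAu]
        refine ⟨?_, ?_, ?_, ?_⟩
        · refine l2 _ ?_
          rw [generate_new]
          exact growA _ _ _ _ (mem_add_self _ _)
        · exact fun hc => l4 ("i", "1") (by simp [subsList]) hc
        · exact fun hc => l4 ("e", "3") (by simp [subsList]) hc
        · exact fun hc => l4 ("o", "0") (by simp [subsList]) hc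
    · -- title already present
      rw [if_neg hc1]
      have htS : pyTitle w ∈ S := by
        rcases Bool.eq_false_or_eq_true (PySem.Set.contains S (pyTitle w)) with h | h
        · simpa [PySem.Set.contains] using h
        · exact absurd h hc1
      obtain ⟨l1, l2, l3, l4⟩ :=
        loopSim n (fun m hm => IHn m hm) w S f (by omega) (by omega) subsList
          (fun q hq => hq) S E (fun x hx => hx) hIC
      have hAu : generate_new w S = stepsA w subsList S := by
        rw [A_unfold w S, if_neg hc1]
      refine ⟨by rw [l1, hAu], ?_, mem_add_self _ _⟩
      intro u hu
      rcases (PySem.Set.mem_add _ _ _).mp hu with hu' | rfl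
      · rw [hAu]; exact l3 u hu'
      · rw [CProp, hAu]
        refine ⟨l2 _ htS, ?_, ?_, ?_⟩
        · exact fun hc => l4 ("i", "1") (by simp [subsList]) hc
        · exact fun hc => l4 ("e", "3") (by simp [subsList]) hc
        · exact fun hc => l4 ("o", "0") (by simp [subsList]) hc

theorem main_sim_dev (w : String) (S : List String) :
    (genBF (fuelA w) w S []).1 = generate_new w S :=
  (simB (phiA w S) w S [] (fuelA w) le_rfl (phi_lt_fuelA w S) (by simp)).1

-- ===== VERDICT (by name: the statement is the Claim_ definition above) =====
theorem generate_new_spec : Claim_equal_generate_new := by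
  intro word set_words _
  unfold Spec_generate_new generate_new_alt
  exact (main_sim_dev word set_words).symm
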